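-- pv_equiv track=rewrite | github.com/denisbeslic/denovopipeline | resources/PointNovo_backup/config.py | _find_all_ptm
-- ===== SOURCE A (Python) =====
-- var_mod_dict = {'M': 'M(Oxidation)'}
--
-- def _find_all_ptm(peptide, position_list):
--     if len(position_list) == 0:
--         return [peptide]
--     position = position_list[0]
--     aa = peptide[position]
--     result = []
--     temp = peptide[:]
--     temp[position] = var_mod_dict[aa]
--     result += _find_all_ptm(temp, position_list[1:])
--     return result
-- ===== SOURCE B (Python) =====
-- var_mod_dict = {'M': 'M(Oxidation)'}
--
-- def _find_all_ptm(peptide, position_list):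
--     temp = peptide[:]
--     for position in position_list:
--         temp[position] = var_mod_dict[temp[position]]
--     return [temp]
-- ===== Notes on version B (the rewrite author's own statement) =====
-- stated objective: simpler
-- what changed: Replaced the recursion (which slices position_list[1:] and copies the peptide at every level) by one copy of the peptide and a single in-place loop over the positions.
import Mathlib
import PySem

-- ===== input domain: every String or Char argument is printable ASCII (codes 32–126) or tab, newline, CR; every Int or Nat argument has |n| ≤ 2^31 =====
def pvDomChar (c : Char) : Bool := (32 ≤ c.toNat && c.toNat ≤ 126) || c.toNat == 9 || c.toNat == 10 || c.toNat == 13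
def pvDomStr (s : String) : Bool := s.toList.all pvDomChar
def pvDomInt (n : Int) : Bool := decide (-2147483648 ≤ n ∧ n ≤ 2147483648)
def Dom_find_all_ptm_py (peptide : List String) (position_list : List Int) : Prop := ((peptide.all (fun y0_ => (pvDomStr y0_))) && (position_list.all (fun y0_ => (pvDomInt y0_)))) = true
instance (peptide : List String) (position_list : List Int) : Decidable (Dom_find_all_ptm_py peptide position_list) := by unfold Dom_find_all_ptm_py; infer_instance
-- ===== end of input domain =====

-- B replaces A's recursion (peptide copy + position_list[1:] slice at every level) by one copy
-- and a single in-place loop over the positions: simpler, same return value.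

-- module constant: var_mod_dict = {'M': 'M(Oxidation)'}
def var_mod_dict : PySem.Dict String String := PySem.Dict.ofList [("M", "M(Oxidation)")]

-- ===== PORT A =====
-- literal transliteration of A; the `none` branches are Python's IndexError/KeyError (outside Pre_)
def find_all_ptm_py (peptide : List String) (position_list : List Int) : List (List String) :=
  match position_list with
  | [] => [peptide]
  | position :: rest =>               -- position = position_list[0]; rest = position_list[1:]
    match PySem.List.pyGet? peptide position with        -- aa = peptide[position]
    | none => []
    | some aa =>
      match PySem.Dict.get? var_mod_dict aa with         -- var_mod_dict[aa]
      | none => []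
      | some v =>
        match PySem.List.pySet? peptide position v with  -- temp = peptide[:]; temp[position] = …
        | none => []
        | some temp => [] ++ find_all_ptm_py temp rest   -- result = []; result += recurse

-- ===== PORT B =====
-- one step of the loop body: temp[position] = var_mod_dict[temp[position]]
def find_all_ptm_step (st : Option (List String)) (position : Int) : Option (List String) :=
  match st with
  | none => none
  | some temp =>
    match PySem.List.pyGet? temp position with
    | none => none
    | some aa =>
      match PySem.Dict.get? var_mod_dict aa with
      | none => none
      | some v => PySem.List.pySet? temp position v

def find_all_ptm_py_alt (peptide : List String) (position_list : List Int) : List (List String) :=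
  match position_list.foldl find_all_ptm_step (some peptide) with  -- temp = peptide[:]; for position in …
  | none => []
  | some temp => [temp]                                            -- return [temp]

-- ===== PRECONDITION & SPEC =====
-- Pre_ excludes exactly the inputs where Python A raises: an out-of-range position (IndexError),
-- a position whose residue is not the key 'M', or a repeated (normalised) position — the second
-- visit reads 'M(Oxidation)', which is not a key (KeyError).
def Pre_find_all_ptm_py (peptide : List String) (position_list : List Int) : Prop :=
  (∀ p ∈ position_list, PySem.Raise.InRange peptide.length p ∧
      peptide.getD (if p < 0 then p + peptide.length else p).toNat "" = "M") ∧
  (position_list.map (fun p => if p < 0 then p + (peptide.length : Int) else p)).Nodup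
instance (peptide : List String) (position_list : List Int) : Decidable (Pre_find_all_ptm_py peptide position_list) := by unfold Pre_find_all_ptm_py; infer_instance

def pvWitness_find_all_ptm_py : List String × List Int := (["M", "A", "M"], [2, 0])

def Spec_find_all_ptm_py (peptide : List String) (position_list : List Int) (out : List (List String)) : Prop := out = find_all_ptm_py_alt peptide position_list
instance (peptide : List String) (position_list : List Int) (out : List (List String)) : Decidable (Spec_find_all_ptm_py peptide position_list out) := by unfold Spec_find_all_ptm_py; infer_instance

-- ===== CLAIM (what is proved, stated in full; the proofs are below) =====
def Claim_equal_find_all_ptm_py : Prop := ∀ (peptide : List String) (position_list : List Int), Dom_find_all_ptm_py peptide position_list → Pre_find_all_ptm_py peptide position_list → Spec_find_all_ptm_py peptide position_list (find_all_ptm_py peptide position_list)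

-- ===== LEMMAS AND PROOFS =====

theorem foldl_step_none (l : List Int) : l.foldl find_all_ptm_step none = none := by
  induction l with
  | nil => rfl
  | cons p rest ih => simpa [find_all_ptm_step] using ih

-- the two ports agree on every input (both return [] where Python raises)
theorem ports_eq (position_list : List Int) (peptide : List String) :
    find_all_ptm_py peptide position_list = find_all_ptm_py_alt peptide position_list := by
  induction position_list generalizing peptide with
  | nil => rfl
  | cons position rest ih =>
    unfold find_all_ptm_py find_all_ptm_py_alt
    rcases hg : PySem.List.pyGet? peptide position with _ | aa
    · simp [List.foldl_cons, find_all_ptm_step, hg, foldl_step_none]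
    · rcases hd : PySem.Dict.get? var_mod_dict aa with _ | v
      · simp [List.foldl_cons, find_all_ptm_step, hg, hd, foldl_step_none]
      · rcases hs : PySem.List.pySet? peptide position v with _ | temp
        · simp [List.foldl_cons, find_all_ptm_step, hg, hd, hs, foldl_step_none]
        · have := ih temp
          unfold find_all_ptm_py_alt at this
          simpa [List.foldl_cons, find_all_ptm_step, hg, hd, hs] using this

-- ===== VERDICT (by name: the statement is the Claim_ definition above) =====
theorem find_all_ptm_py_spec : Claim_equal_find_all_ptm_py := by
  intro peptide position_list _ _
  exact ports_eq position_list peptide
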